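-- pv_equiv track=rewrite | github.com/dokyung36d/programmersCodingTest | 0 만들기.py | getPossibleCases
-- ===== SOURCE A (Python) =====
-- def getPossibleCases(appliedBlank : list):
--     queue = [(appliedBlank, [])]
--     returnList = []
--
--     while queue:
--         node = queue.pop()
--         numList, prevOperator = node[0], node[1]
--
--         if len(numList) == 2:
--             if numList[0] == numList[1]:
--                 returnList.append(prevOperator + ["-"])
--             elif numList[0] == -numList[1]:
--                 returnList.append(prevOperator + ["+"])
--
--             continue
--
--
--
--         firstOperand, secondOperand = numList[0], numList[1]
--         newList = [firstOperand + secondOperand] + numList[2:]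
--         queue.append((newList, prevOperator + ["+"]))
--
--         newList = [firstOperand - secondOperand] + numList[2:]
--         queue.append((newList, prevOperator + ["-"]))
--
--     return returnList
-- ===== SOURCE B (Python) =====
-- def getPossibleCases(appliedBlank : list):
--     def rec(numList, prevOp):
--         a, b = numList[0], numList[1]
--         if len(numList) == 2:
--             if a == b:
--                 return [prevOp + ["-"]]
--             if a == -b:
--                 return [prevOp + ["+"]]
--             return []
--         return rec([a - b] + numList[2:], prevOp + ["-"]) + rec([a + b] + numList[2:], prevOp + ["+"])
--     return rec(appliedBlank, [])
-- ===== Notes on version B (the rewrite author's own statement) =====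
-- stated objective: simpler
-- what changed: Replaces the explicit LIFO work-queue and mutable result list with a direct recursion on the number list ('-' branch before '+' to keep the stack's DFS order), concatenating the two sub-results.
import Mathlib
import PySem

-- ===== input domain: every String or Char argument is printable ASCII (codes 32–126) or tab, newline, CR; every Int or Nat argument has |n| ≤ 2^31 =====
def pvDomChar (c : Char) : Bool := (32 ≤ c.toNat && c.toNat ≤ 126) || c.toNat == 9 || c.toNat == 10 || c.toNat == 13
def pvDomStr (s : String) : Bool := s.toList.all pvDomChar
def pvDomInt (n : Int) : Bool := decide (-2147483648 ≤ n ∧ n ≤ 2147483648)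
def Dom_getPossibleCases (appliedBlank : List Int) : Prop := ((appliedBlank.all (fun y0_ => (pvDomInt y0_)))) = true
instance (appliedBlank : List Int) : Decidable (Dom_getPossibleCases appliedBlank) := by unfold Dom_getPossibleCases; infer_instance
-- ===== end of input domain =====

-- B replaces A's explicit LIFO work-queue and mutable result list with a direct recursion
-- ('-' branch before '+', preserving the stack's DFS order); objective: simpler, same cost.


-- ===== PORT A =====
-- The Python queue (list, pop/append at the end) is represented head-first: the head of
-- `queue` is the element Python's `queue.pop()` removes; `returnList.append` is `acc ++ [·]`.
def pvLoopA (queue : List (List Int × List String)) (acc : List (List String)) : List (List String) :=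
  match queue with
  | [] => acc
  | (numList, prevOperator) :: qs =>
    match numList with
    | [a, b] =>                                   -- len(numList) == 2
      if a = b then pvLoopA qs (acc ++ [prevOperator ++ ["-"]])
      else if a = -b then pvLoopA qs (acc ++ [prevOperator ++ ["+"]])
      else pvLoopA qs acc                          -- continue
    | a :: b :: rest =>                            -- len ≥ 3: push '+' child then '-' child ('-' ends on top)
      pvLoopA (((a - b) :: rest, prevOperator ++ ["-"]) :: ((a + b) :: rest, prevOperator ++ ["+"]) :: qs) acc
    | _ => pvLoopA qs acc                          -- Python raises IndexError here; excluded by Pre_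
termination_by (queue.map (fun p => 3 ^ p.1.length)).sum
decreasing_by
  all_goals simp
  have h : 0 < 3 ^ (rest.length + 1) := Nat.pow_pos (by norm_num)
  simp [pow_succ]; omega

def getPossibleCases (appliedBlank : List Int) : List (List String) :=
  pvLoopA [(appliedBlank, [])] []

-- ===== PORT B =====
def pvRecB (numList : List Int) (prevOp : List String) : List (List String) :=
  match numList with
  | [a, b] =>
    if a = b then [prevOp ++ ["-"]]
    else if a = -b then [prevOp ++ ["+"]]
    else []
  | a :: b :: rest =>
    pvRecB ((a - b) :: rest) (prevOp ++ ["-"]) ++ pvRecB ((a + b) :: rest) (prevOp ++ ["+"])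
  | _ => []                                        -- Python raises IndexError here; excluded by Pre_
termination_by numList.length

def getPossibleCases_alt (appliedBlank : List Int) : List (List String) :=
  pvRecB appliedBlank []

-- ===== PRECONDITION & SPEC =====
-- Pre_ excludes only lists of length < 2, where both A and B raise IndexError.
def Pre_getPossibleCases (appliedBlank : List Int) : Prop := 2 ≤ appliedBlank.length
instance (appliedBlank : List Int) : Decidable (Pre_getPossibleCases appliedBlank) := by unfold Pre_getPossibleCases; infer_instance
def pvWitness_getPossibleCases : List Int := [1, 1]

def Spec_getPossibleCases (appliedBlank : List Int) (out : List (List String)) : Prop := out = getPossibleCases_alt appliedBlank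
instance (appliedBlank : List Int) (out : List (List String)) : Decidable (Spec_getPossibleCases appliedBlank out) := by unfold Spec_getPossibleCases; infer_instance

-- ===== CLAIM (what is proved, stated in full; the proofs are below) =====
def Claim_equal_getPossibleCases : Prop := ∀ (appliedBlank : List Int), Dom_getPossibleCases appliedBlank → Pre_getPossibleCases appliedBlank → Spec_getPossibleCases appliedBlank (getPossibleCases appliedBlank)

-- ===== LEMMAS AND PROOFS =====
-- Main invariant: the stack loop produces acc followed by the recursive results of the
-- queued items, in stack order.
theorem pvLoopA_eq (queue : List (List Int × List String)) (acc : List (List String)) :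
    pvLoopA queue acc = acc ++ (queue.map (fun p => pvRecB p.1 p.2)).flatten := by
  induction queue, acc using pvLoopA.induct
  · simp [pvLoopA]
  · rename_i acc prevOp qs b ih
    simp [pvLoopA, pvRecB, ih]
  · rename_i acc prevOp qs b h ih
    simp [pvLoopA, pvRecB, h, ih]
  · rename_i acc prevOp qs a b h1 h2 ih
    simp [pvLoopA, pvRecB, h1, h2, ih]
  · rename_i acc prevOp qs a b rest hne ih
    obtain ⟨c, rs, rfl⟩ := List.exists_cons_of_ne_nil (fun h => hne h)
    rw [pvLoopA, ih] <;> simp [pvRecB]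
  · rename_i acc numList prevOp qs h2 h3 ih
    rcases numList with _ | ⟨a, _ | ⟨b, rest⟩⟩
    · rw [pvLoopA, ih] <;> simp [pvRecB]
    · rw [pvLoopA, ih] <;> simp [pvRecB]
    · exact absurd rfl (h3 a b rest)

-- ===== VERDICT (by name: the statement is the Claim_ definition above) =====
theorem getPossibleCases_spec : Claim_equal_getPossibleCases := by
  intro xs _ _
  unfold Spec_getPossibleCases getPossibleCases getPossibleCases_alt
  rw [pvLoopA_eq]
  simp
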